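-- pv_equiv track=rewrite | github.com/jrebecchi/xpath-helper | python/xpath-helper/xpath_helper/filter.py | replace_apostrophes
-- ===== SOURCE A (Python) =====
-- def replace_apostrophes(input: str) -> str:
--     """Treats the presence of apostrophes so it doesn't break the XPath filter expression.
--
--     Args:
--         input (str | int): input
--
--     Returns:
--         str: XPath filter expression with apostrophes handled.
--     """
--     if not isinstance(input, str):
--         return str(input)
--
--     if "'" in input:
--         prefix: str = ""
--         elements = input.split("'")
--         output = "concat("
--         for s in elements:
--             output += prefix + "'" + s + "'"
--             prefix = ',"\'",'
--
--         output += ")"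
--         return output
--
--     else:
--         return "'" + input + "'"
-- ===== SOURCE B (Python) =====
-- def replace_apostrophes(input: str) -> str:
--     """Same behaviour as A: one replace pass instead of split + accumulation loop."""
--     if not isinstance(input, str):
--         return str(input)
--     if "'" in input:
--         return "concat('" + input.replace("'", "',\"'\",'") + "')"
--     return "'" + input + "'"
-- ===== Notes on version B (the rewrite author's own statement) =====
-- stated objective: simpler
-- what changed: The apostrophe branch's split-into-pieces plus prefix-accumulation loop is replaced by a single str.replace substitution pass whose result is wrapped once between the concat opening and closing tokens.
import Mathlib
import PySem

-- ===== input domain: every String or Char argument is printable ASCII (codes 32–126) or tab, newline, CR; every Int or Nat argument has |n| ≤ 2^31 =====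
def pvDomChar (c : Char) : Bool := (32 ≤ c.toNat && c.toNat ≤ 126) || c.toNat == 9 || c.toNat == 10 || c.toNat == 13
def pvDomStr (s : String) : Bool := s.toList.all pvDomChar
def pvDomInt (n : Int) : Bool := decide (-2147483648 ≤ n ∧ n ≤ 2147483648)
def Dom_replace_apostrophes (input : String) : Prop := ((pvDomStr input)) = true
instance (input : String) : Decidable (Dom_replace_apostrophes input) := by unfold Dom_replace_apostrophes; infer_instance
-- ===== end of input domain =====

-- B replaces A's split + prefix-accumulation loop by a single str.replace pass wrapped once (objective: simpler).
-- Since the Lean parameter is a String, Python's non-str guard (unreachable here) is not ported.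

-- ===== PORT A =====
def replace_apostrophes (input : String) : String :=
  if PySem.Str.isIn "'" input then
    let elements : List String := (PySem.Chars.splitOn input.toList "'".toList).map String.ofList
    let res := elements.foldl
      (fun (st : String × String) s => (st.1 ++ st.2 ++ "'" ++ s ++ "'", ",\"'\","))
      ("concat(", "")
    res.1 ++ ")"
  else
    "'" ++ input ++ "'"

-- ===== PORT B =====
def replace_apostrophes_alt (input : String) : String :=
  if PySem.Str.isIn "'" input then
    "concat('" ++ PySem.Str.replace input "'" "',\"'\",'" ++ "')"
  else
    "'" ++ input ++ "'"

-- ===== PRECONDITION & SPEC =====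
def Spec_replace_apostrophes (input : String) (out : String) : Prop := out = replace_apostrophes_alt input
instance (input : String) (out : String) : Decidable (Spec_replace_apostrophes input out) := by unfold Spec_replace_apostrophes; infer_instance

-- ===== CLAIM (what is proved, stated in full; the proofs are below) =====
def Claim_equal_replace_apostrophes : Prop := ∀ (input : String), Dom_replace_apostrophes input → Spec_replace_apostrophes input (replace_apostrophes input)

-- ===== LEMMAS AND PROOFS =====

/-- Split a char list at every occurrence of the single character `c` (always nonempty). -/
def splitCh (c : Char) : List Char → List (List Char)
  | [] => [[]]
  | a :: t =>
    if a = c then [] :: splitCh c t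
    else
      match splitCh c t with
      | [] => [[a]]
      | h :: r => (a :: h) :: r

/-- Join a nonempty family with separator `w` (list-level intercalate). -/
def joinSep (w : List Char) : List (List Char) → List Char
  | [] => []
  | [x] => x
  | x :: y :: r => x ++ w ++ joinSep w (y :: r)

/-- The quoted, comma-separated body A's loop builds, with the current prefix as parameter. -/
def qjoinL (p : List Char) : List (List Char) → List Char
  | [] => []
  | e :: r => p ++ ['\''] ++ e ++ ['\''] ++ qjoinL (",\"'\",".toList) r

theorem splitCh_ne_nil (c : Char) (l : List Char) : splitCh c l ≠ [] := by
  cases l with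
  | nil => simp [splitCh]
  | cons a t =>
    simp only [splitCh]
    split
    · simp
    · rcases h : splitCh c t with _ | ⟨x, r⟩ <;> simp

theorem go_splitOn (c : Char) : ∀ (fuel : Nat) (l cur : List Char) (acc : List (List Char)),
    l.length ≤ fuel →
    PySem.Chars.splitOn.go [c] fuel l cur acc =
      acc.reverse ++ (match splitCh c l with
        | [] => []
        | h :: r => (cur.reverse ++ h) :: r) := by
  intro fuel
  induction fuel with
  | zero =>
    intro l cur acc hl
    interval_cases hl' : l.length
    · have : l = [] := List.length_eq_zero_iff.mp hl'
      subst this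
      rw [PySem.Chars.splitOn.go.eq_def]
      simp [splitCh]
  | succ n ih =>
    intro l cur acc hl
    rw [PySem.Chars.splitOn.go.eq_def]
    cases l with
    | nil => simp [splitCh]
    | cons a t =>
      simp only [List.isPrefixOf, Bool.and_true]
      by_cases hac : a = c
      · subst hac
        rw [if_pos (by simp)]
        have ht : t.length ≤ n := by simp at hl; omega
        rw [show List.drop [a].length (a :: t) = t from rfl, ih t [] (cur.reverse :: acc) ht]
        rcases h : splitCh a t with _ | ⟨x, r⟩
        · exact absurd h (splitCh_ne_nil a t)
        · simp [splitCh, h]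
      · have hbeq : (c == a) = false := by simp; exact fun h => hac h.symm
        rw [if_neg (by simp [hbeq])]
        have ht : t.length ≤ n := by simpa using Nat.lt_succ_iff.mp (by simpa using hl)
        rw [ih t (a :: cur) acc ht]
        rcases h : splitCh c t with _ | ⟨x, r⟩
        · exact absurd h (splitCh_ne_nil c t)
        · simp [splitCh, hac, h]

theorem splitOn_eq_splitCh (c : Char) (l : List Char) :
    PySem.Chars.splitOn l [c] = splitCh c l := by
  unfold PySem.Chars.splitOn
  rw [go_splitOn c (l.length + 1) l [] [] (by omega)]
  rcases h : splitCh c l with _ | ⟨x, r⟩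
  · exact absurd h (splitCh_ne_nil c l)
  · simp

theorem go_replace (c : Char) (w : List Char) :
    ∀ (fuel : Nat) (l acc : List Char), l.length ≤ fuel →
    PySem.Chars.replace.go [c] w fuel l acc =
      acc.reverse ++ joinSep w (splitCh c l) := by
  intro fuel
  induction fuel with
  | zero =>
    intro l acc hl
    have : l = [] := List.length_eq_zero_iff.mp (by omega)
    subst this
    rw [PySem.Chars.replace.go.eq_def]
    simp [splitCh, joinSep]
  | succ n ih =>
    intro l acc hl
    rw [PySem.Chars.replace.go.eq_def]
    cases l with
    | nil => simp [splitCh, joinSep]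
    | cons a t =>
      simp only [List.isPrefixOf, Bool.and_true]
      have ht : t.length ≤ n := by simpa using Nat.lt_succ_iff.mp (by simpa using hl)
      by_cases hac : a = c
      · subst hac
        rw [if_pos (by simp)]
        rw [show List.drop [a].length (a :: t) = t from rfl, ih t (w.reverse ++ acc) ht]
        rcases h : splitCh a t with _ | ⟨x, r⟩
        · exact absurd h (splitCh_ne_nil a t)
        · simp [splitCh, h, joinSep]
      · have hbeq : (c == a) = false := by simp; exact fun h => hac h.symm
        rw [if_neg (by simp [hbeq])]
        rw [ih t (a :: acc) ht]
        rcases h : splitCh c t with _ | ⟨x, r⟩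
        · exact absurd h (splitCh_ne_nil c t)
        · rcases r with _ | ⟨y, r'⟩ <;> simp [splitCh, hac, h, joinSep]

theorem replace_eq_joinSep (c : Char) (w l : List Char) :
    PySem.Chars.replace l [c] w = joinSep w (splitCh c l) := by
  unfold PySem.Chars.replace
  rw [if_neg (by simp), go_replace c w l.length l [] le_rfl]
  simp

/-- A's loop computes `acc ++ qjoinL p es` in the first component. -/
theorem foldA (es : List String) : ∀ (a p : String),
    (es.foldl (fun (st : String × String) s => (st.1 ++ st.2 ++ "'" ++ s ++ "'", ",\"'\",")) (a, p)).1
      = a ++ String.ofList (qjoinL p.toList (es.map String.toList)) := by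
  induction es with
  | nil => intro a p; apply String.toList_inj.mp; simp [qjoinL]
  | cons e r ih =>
    intro a p
    simp only [List.foldl_cons, List.map_cons]
    rw [ih]
    apply String.toList_inj.mp
    simp [qjoinL]

theorem qjoinL_cons_prefix (p : List Char) (e : List Char) (r : List (List Char)) :
    qjoinL p (e :: r) = p ++ qjoinL [] (e :: r) := by
  simp [qjoinL]

/-- Core identity: the quoted comma-joined body equals a single quote-wrapped intercalation. -/
theorem qjoin_eq_wrap (h : List Char) (r : List (List Char)) :
    qjoinL [] (h :: r) = ['\''] ++ joinSep ("',\"'\",'".toList) (h :: r) ++ ['\''] := by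
  induction r generalizing h with
  | nil => simp [qjoinL, joinSep]
  | cons y r' ih =>
    rw [show qjoinL [] (h :: y :: r') = [] ++ ['\''] ++ h ++ ['\''] ++ qjoinL (",\"'\",".toList) (y :: r') from rfl,
        qjoinL_cons_prefix, ih y]
    rw [show joinSep ("',\"'\",'".toList) (h :: y :: r') = h ++ "',\"'\",'".toList ++ joinSep ("',\"'\",'".toList) (y :: r') from rfl]
    simp [show (",\"'\",".toList : List Char) = [',', '"', '\'', '"', ','] from by decide,
          show ("',\"'\",'".toList : List Char) = ['\'', ',', '"', '\'', '"', ',', '\''] from by decide]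

-- ===== VERDICT (by name: the statement is the Claim_ definition above) =====
theorem replace_apostrophes_spec : Claim_equal_replace_apostrophes := by
  intro input _
  unfold Spec_replace_apostrophes replace_apostrophes replace_apostrophes_alt
  by_cases h : PySem.Str.isIn "'" input = true
  · rw [if_pos h, if_pos h]
    simp only [foldA]
    apply String.toList_inj.mp
    rw [show ("'" : String).toList = ['\''] from rfl] 
    simp only [String.toList_append, String.toList_ofList, PySem.Str.toList_replace]
    rw [show ("'" : String).toList = ['\''] from rfl,
        replace_eq_joinSep '\'' ("',\"'\",'".toList) input.toList,
        splitOn_eq_splitCh '\'' input.toList]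
    rcases hp : splitCh '\'' input.toList with _ | ⟨x, r⟩
    · exact absurd hp (splitCh_ne_nil _ _)
    · rw [show (((x :: r).map String.ofList).map String.toList) = x :: r from by
            simp [List.map_map, Function.comp_def]]
      rw [show ("" : String).toList = ([] : List Char) from rfl, qjoin_eq_wrap x r]
      simp [show ("concat(" : String).toList = ['c','o','n','c','a','t','('] from by decide,
            show ("concat('" : String).toList = ['c','o','n','c','a','t','(','\''] from by decide,
            show (")" : String).toList = [')'] from by decide,
            show ("')" : String).toList = ['\'',')'] from by decide]
  · rw [if_neg h, if_neg h]
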